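-- pv_equiv track=rewrite | github.com/miliar/Code_Jam_Webscraper | solutions_python/solutions_year16_round1_nr1/1409.py | Solve
-- ===== SOURCE A (Python) =====
-- def Solve(word):
--     if len(word)>1:
--         prev=Solve(word[:-1])
--     else:
--         prev=""
--     last_char=word[-1:]
--     variants=[last_char+prev,prev+last_char]
--     variants.sort()
--     return("".join(variants[-1:]))
-- ===== SOURCE B (Python) =====
-- def Solve(word):
--     # One pass: the first char of the running result is always its maximum,
--     # so each char is prepended when it is >= that first char, else appended.
--     # Prepends are collected in `pre` (reversed at the end), appends in `suf`.
--     pre = []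
--     suf = []
--     for c in word:
--         if pre and c < pre[-1]:
--             suf.append(c)
--         else:
--             pre.append(c)
--     pre.reverse()
--     return "".join(pre + suf)
-- ===== Notes on version B (the rewrite author's own statement) =====
-- stated objective: faster
-- what changed: A rebuilds the answer recursively, sorting the two candidate strings (prepend/append of the last char) at every step; B does one left-to-right pass that prepends a char when it is >= the current first char (the running maximum) and appends it otherwise, collecting prepends and appends in two lists joined at the end.
import Mathlib
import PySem

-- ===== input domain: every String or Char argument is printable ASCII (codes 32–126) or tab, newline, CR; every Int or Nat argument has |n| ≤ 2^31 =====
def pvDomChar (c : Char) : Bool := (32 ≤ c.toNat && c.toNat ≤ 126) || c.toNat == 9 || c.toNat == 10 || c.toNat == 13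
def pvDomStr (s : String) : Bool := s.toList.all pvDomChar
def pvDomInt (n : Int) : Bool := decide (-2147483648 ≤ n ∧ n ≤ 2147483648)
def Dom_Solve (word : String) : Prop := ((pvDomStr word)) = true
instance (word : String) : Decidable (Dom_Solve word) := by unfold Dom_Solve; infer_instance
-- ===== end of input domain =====

-- B replaces A's per-character rebuild-and-sort recursion by a single left-to-right
-- pass that prepends or appends each character (objective: faster).


-- ===== PORT A =====
-- last_char = word[-1:]; variants = [last_char+prev, prev+last_char]; variants.sort();
-- return "".join(variants[-1:])
def solveATail (prev w : List Char) : List Char :=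
  let lastChar := PySem.List.slice w (some (-1)) none
  let variants := PySem.List.sorted [lastChar ++ prev, prev ++ lastChar] (fun x => x) false
  PySem.Chars.join [] (PySem.List.slice variants (some (-1)) none)

-- prev = Solve(word[:-1]) if len(word) > 1 else ""
def solveA (w : List Char) : List Char :=
  if _h : 1 < PySem.Chars.len w then
    solveATail (solveA (PySem.List.slice w none (some (-1)))) w
  else
    solveATail [] w
termination_by w.length
decreasing_by
  simp only [PySem.List.slice_to_neg_one, PySem.Chars.len_eq] at *
  simp [List.length_dropLast]; omega

def Solve (word : String) : String := String.ofList (solveA word.toList)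

-- ===== PORT B =====
-- one pass over the word: prepends collected in `pre` (kept front-first, i.e. Source B's
-- append-then-final-reverse becomes cons), appends in `suf`
def stepB (ps : List Char × List Char) (c : Char) : List Char × List Char :=
  match ps with
  | (pre, suf) =>
    match pre with
    | [] => (c :: pre, suf)
    | h :: _ => if c < h then (pre, suf ++ [c]) else (c :: pre, suf)

def Solve_alt (word : String) : String :=
  let (pre, suf) := word.toList.foldl stepB ([], [])
  String.ofList (pre ++ suf)

-- ===== PRECONDITION & SPEC =====
def Spec_Solve (word : String) (out : String) : Prop := out = Solve_alt word
instance (word : String) (out : String) : Decidable (Spec_Solve word out) := by unfold Spec_Solve; infer_instance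

-- ===== CLAIM (what is proved, stated in full; the proofs are below) =====
def Claim_equal_Solve : Prop := ∀ (word : String), Dom_Solve word → Spec_Solve word (Solve word)

-- ===== LEMMAS AND PROOFS =====

-- B's effective step on the combined result pre ++ suf
def stepR (r : List Char) (c : Char) : List Char :=
  match r with
  | [] => [c]
  | h :: _ => if c < h then r ++ [c] else c :: r

theorem sorted_pair (a b : List Char) :
    PySem.List.sorted [a, b] (fun x => x) false = if b < a then [b, a] else [a, b] := by
  simp [PySem.List.sorted, PySem.List.insertBy]

-- "".join(variants[-1:]) after sorting a two-element list is its lexicographic maximum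
theorem pick_max (a b : List Char) :
    PySem.Chars.join [] (PySem.List.slice (PySem.List.sorted [a, b] (fun x => x) false) (some (-1)) none)
      = if b < a then a else b := by
  rw [sorted_pair]
  split_ifs <;> simp [PySem.List.slice_from_neg_one, PySem.Chars.join_singleton]

theorem append_last_le (h : Char) : ∀ (t : List Char), (∀ x ∈ t, x ≤ h) →
    t ++ [h] < h :: t ∨ t ++ [h] = h :: t := by
  intro t
  induction t with
  | nil => intro _; right; rfl
  | cons a t' ih =>
    intro hall
    have ha : a ≤ h := hall a (by simp)
    rcases lt_or_eq_of_le ha with hlt | heq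
    · left; exact List.cons_lt_cons_iff.2 (Or.inl hlt)
    · subst heq
      rcases ih (fun x hx => hall x (by simp [hx])) with h1 | h1
      · left; exact List.cons_lt_cons_iff.2 (Or.inr ⟨rfl, h1⟩)
      · right; simp [h1]

-- when the running result's first char is its maximum, A's sort-and-take-last step
-- equals B's prepend-or-append step
theorem stepA_eq (r : List Char) (l : List Char) (c : Char)
    (hinv : ∀ x ∈ r, ∀ h' ∈ r.head?, x ≤ h') :
    solveATail r (l ++ [c]) = stepR r c := by
  unfold solveATail
  have hlast : PySem.List.slice (l ++ [c]) (some (-1)) none = [c] := by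
    rw [PySem.List.slice_from_neg_one]; simp
  rw [hlast]
  simp only [List.singleton_append]
  rw [pick_max]
  match r with
  | [] => simp [stepR]
  | h :: t =>
    have hall : ∀ x ∈ h :: t, x ≤ h := fun x hx => hinv x hx h (by simp)
    show (if (h :: t) ++ [c] < c :: (h :: t) then c :: (h :: t) else (h :: t) ++ [c]) = stepR (h :: t) c
    by_cases hc : c < h
    · have hab : ¬ ((h :: t) ++ [c] < c :: (h :: t)) := by
        intro hlt
        rcases List.cons_lt_cons_iff.1 (by simpa using hlt) with h1 | ⟨h1, _⟩
        · exact absurd (lt_trans hc h1) (lt_irrefl _)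
        · exact absurd h1 (ne_of_gt hc)
      rw [if_neg hab]; simp [stepR, hc]
    · have hhc : h ≤ c := le_of_not_gt hc
      rcases lt_or_eq_of_le hhc with hlt | heq
      · have hab : (h :: t) ++ [c] < c :: (h :: t) := by
          simpa using List.cons_lt_cons_iff.2 (Or.inl hlt)
        rw [if_pos hab]; simp [stepR, hc]
      · subst heq
        rcases append_last_le h (h :: t) hall with h1 | h1
        · rw [if_pos (by simpa using h1)]; simp [stepR]
        · rw [if_neg (by rw [h1]; exact lt_irrefl _)]
          simp [stepR]
          simpa using h1

-- the invariant: the first char of the running result is its maximum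
theorem inv_stepR (r : List Char) (c : Char)
    (hinv : ∀ x ∈ r, ∀ h' ∈ r.head?, x ≤ h') :
    ∀ x ∈ stepR r c, ∀ h' ∈ (stepR r c).head?, x ≤ h' := by
  match r with
  | [] => simp [stepR]
  | h :: t =>
    have hall : ∀ x ∈ h :: t, x ≤ h := fun x hx => hinv x hx h (by simp)
    by_cases hc : c < h
    · simp only [stepR, if_pos hc]
      intro x hx h' hh'
      simp at hh'; subst hh'
      simp at hx
      rcases hx with h1 | h1 | h1
      · subst h1; exact le_refl _
      · exact hall x (by simp [h1])
      · subst h1; exact le_of_lt hc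
    · simp only [stepR, if_neg hc]
      intro x hx h' hh'
      simp at hh'; subst hh'
      rcases List.mem_cons.1 hx with h1 | h1
      · exact le_of_eq h1
      · exact le_trans (hall x h1) (le_of_not_gt hc)

theorem inv_foldl (l : List Char) : ∀ (r : List Char),
    (∀ x ∈ r, ∀ h' ∈ r.head?, x ≤ h') →
    ∀ x ∈ l.foldl stepR r, ∀ h' ∈ (l.foldl stepR r).head?, x ≤ h' := by
  induction l with
  | nil => intro r h; exact h
  | cons c t ih => intro r h; exact ih (stepR r c) (inv_stepR r c h)

-- A is the left fold of B's effective step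
theorem solveA_spec : ∀ (w : List Char), solveA w = w.foldl stepR [] := by
  intro w
  induction w using List.reverseRecOn with
  | nil =>
    rw [solveA, dif_neg (by simp)]
    simp [solveATail, PySem.List.slice_from_neg_one, PySem.List.sorted,
      PySem.List.insertBy, PySem.Chars.join, List.intercalate]
  | append_singleton l c ih =>
    rw [solveA]
    match l with
    | [] =>
      rw [dif_neg (by simp)]
      simpa using stepA_eq [] [] c (by simp)
    | a :: l' =>
      rw [dif_pos (by simp)]
      rw [show PySem.List.slice ((a :: l') ++ [c]) none (some (-1)) = a :: l' by
        rw [PySem.List.slice_to_neg_one]; exact List.dropLast_concat ..]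
      rw [ih, List.foldl_append]
      exact stepA_eq _ _ c (inv_foldl (a :: l') [] (by simp))

-- B's two-list fold computes the fold of its effective step
theorem foldB_combined : ∀ (l : List Char) (pre suf : List Char),
    (pre = [] → suf = []) →
    (let (p, s) := l.foldl stepB (pre, suf); p ++ s) = l.foldl stepR (pre ++ suf) := by
  intro l
  induction l with
  | nil => intro pre suf h; rfl
  | cons c t ih =>
    intro pre suf h
    match pre with
    | [] =>
      rw [h rfl]
      simpa [stepB, stepR] using ih [c] [] (fun _ => rfl)
    | h' :: pre' =>
      by_cases hc : c < h'
      · simpa [stepB, stepR, hc] using ih (h' :: pre') (suf ++ [c]) (by simp)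
      · simpa [stepB, stepR, hc] using ih (c :: h' :: pre') suf (by simp)

-- ===== VERDICT (by name: the statement is the Claim_ definition above) =====
theorem Solve_spec : Claim_equal_Solve := by
  intro word _
  unfold Spec_Solve Solve Solve_alt
  have h := foldB_combined word.toList [] [] (fun _ => rfl)
  simp only at h
  rw [solveA_spec]
  cases hfb : word.toList.foldl stepB ([], []) with
  | mk p s => simp only [hfb] at h; simp [h]
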